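-- pv_equiv track=rewrite | github.com/narakornnora/AgentPro | apps/orchestrator/quality_gate_integration.py | _extract_html_content
-- ===== SOURCE A (Python) =====
-- from typing import Dict, List, Any, Optional, Tuple
--
-- def _extract_html_content(files: Dict[str, str]) -> str:
--     """Extract HTML content from app files"""
--     # Look for main HTML files
--     html_files = [f for f in files.keys() if f.endswith('.html')]
--
--     # Prioritize index.html or main.html
--     priority_files = ['index.html', 'main.html', 'app.html']
--     for priority in priority_files:
--         if priority in files:
--             return files[priority]
--
--     # Return first HTML file found
--     if html_files:
--         return files[html_files[0]]
--
--     return ""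
-- ===== SOURCE B (Python) =====
-- def _rank(f):
--     if f == 'index.html':
--         return 0
--     if f == 'main.html':
--         return 1
--     if f == 'app.html':
--         return 2
--     return 3
--
-- def _extract_html_content(files):
--     """Extract HTML content from app files: one scored pass instead of two scans."""
--     candidates = [f for f in files if _rank(f) < 3 or f.endswith('.html')]
--     if not candidates:
--         return ""
--     return files[min(candidates, key=_rank)]
-- ===== Notes on version B (the rewrite author's own statement) =====
-- stated objective: idiomatic
-- what changed: Replaces the two sequential scans (priority loop over a fixed list, then a first-html fallback) by building one candidate list and selecting its minimum under a numeric rank via min(..., key=...), relying on min's first-minimum stability.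
import Mathlib
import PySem

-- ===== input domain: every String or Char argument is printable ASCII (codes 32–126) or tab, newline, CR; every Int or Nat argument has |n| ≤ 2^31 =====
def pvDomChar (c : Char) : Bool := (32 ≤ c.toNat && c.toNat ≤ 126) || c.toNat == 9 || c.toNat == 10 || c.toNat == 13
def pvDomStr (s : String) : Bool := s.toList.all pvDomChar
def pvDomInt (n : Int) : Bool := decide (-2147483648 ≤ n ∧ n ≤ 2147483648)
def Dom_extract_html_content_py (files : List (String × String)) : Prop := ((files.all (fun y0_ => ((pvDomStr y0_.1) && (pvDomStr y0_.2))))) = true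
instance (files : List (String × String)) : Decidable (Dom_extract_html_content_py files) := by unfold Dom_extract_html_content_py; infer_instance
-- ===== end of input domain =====

-- B selects the best candidate by a numeric rank via min(..., key=...) in one selection instead of A's two sequential scans (idiomatic; same cost).

-- ===== PORT A =====
-- the 'for priority in priority_files: if priority in files: return files[priority]' loop
def pvFirstPriority (d : PySem.Dict String String) : List String → Option String
  | [] => none
  | p :: ps => if d.contains p then some (d.getD p "") else pvFirstPriority d ps

def extract_html_content_py (files : List (String × String)) : String :=
  let d := PySem.Dict.ofList files
  let html_files := d.keys.filter (fun f => PySem.Str.endswith f ".html")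
  match pvFirstPriority d ["index.html", "main.html", "app.html"] with
  | some v => v
  | none =>
    match html_files with
    | f :: _ => d.getD f ""
    | [] => ""

-- ===== PORT B =====
def pvRank (f : String) : Int :=
  if f = "index.html" then 0
  else if f = "main.html" then 1
  else if f = "app.html" then 2
  else 3

def extract_html_content_py_alt (files : List (String × String)) : String :=
  let d := PySem.Dict.ofList files
  let candidates := d.keys.filter (fun f => decide (pvRank f < 3) || PySem.Str.endswith f ".html")
  match PySem.List.min? candidates pvRank with
  | some best => d.getD best ""
  | none => ""

-- ===== PRECONDITION & SPEC =====
def Spec_extract_html_content_py (files : List (String × String)) (out : String) : Prop := out = extract_html_content_py_alt files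
instance (files : List (String × String)) (out : String) : Decidable (Spec_extract_html_content_py files out) := by unfold Spec_extract_html_content_py; infer_instance

-- ===== CLAIM (what is proved, stated in full; the proofs are below) =====
def Claim_equal_extract_html_content_py : Prop := ∀ (files : List (String × String)), Dom_extract_html_content_py files → Spec_extract_html_content_py files (extract_html_content_py files)

-- ===== LEMMAS AND PROOFS =====

-- every string is one of the three priority names or has rank 3
theorem pvRank_cases (f : String) :
    f = "index.html" ∨ f = "main.html" ∨ f = "app.html" ∨
      (pvRank f = 3 ∧ f ≠ "index.html" ∧ f ≠ "main.html" ∧ f ≠ "app.html") := by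
  unfold pvRank; split_ifs <;> simp_all

-- the two filter predicates agree: every priority name itself ends with ".html"
theorem candidates_eq (l : List String) :
    l.filter (fun f => decide (pvRank f < 3) || PySem.Str.endswith f ".html")
      = l.filter (fun f => PySem.Str.endswith f ".html") := by
  apply List.filter_congr
  intro f _
  rcases pvRank_cases f with rfl | rfl | rfl | hf
  · decide
  · decide
  · decide
  · simp [hf.1]

-- one step of the min(..., key=pvRank) fold
theorem min?_step (x m : String) (c : List String) :
    PySem.List.min? (m :: x :: c) pvRank
      = PySem.List.min? ((if pvRank x < pvRank m then x else m) :: c) pvRank := by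
  by_cases h : pvRank x < pvRank m <;> simp [PySem.List.min?, h]

-- the first element of minimal rank, in closed form (nonempty list)
theorem min?_cons_rank (c : List String) (m : String) :
    PySem.List.min? (m :: c) pvRank
      = some (if "index.html" = m ∨ "index.html" ∈ c then "index.html"
          else if "main.html" = m ∨ "main.html" ∈ c then "main.html"
          else if "app.html" = m ∨ "app.html" ∈ c then "app.html" else m) := by
  induction c generalizing m with
  | nil =>
    simp only [PySem.List.min?, List.foldl, List.not_mem_nil, or_false]
    split_ifs <;> simp_all
  | cons x c ih =>
    rw [min?_step, ih]
    rcases pvRank_cases x with hx | hx | hx | hx <;>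
      rcases pvRank_cases m with hm | hm | hm | hm <;>
        simp_all [pvRank] <;> split_ifs <;> simp_all

theorem min?_rank (c : List String) :
    PySem.List.min? c pvRank =
      if "index.html" ∈ c then some "index.html"
      else if "main.html" ∈ c then some "main.html"
      else if "app.html" ∈ c then some "app.html"
      else c.head? := by
  cases c with
  | nil => simp [PySem.List.min?]
  | cons m c =>
    rw [min?_cons_rank]
    simp only [List.mem_cons, List.head?_cons]
    split_ifs <;> rfl

-- ===== VERDICT (by name: the statement is the Claim_ definition above) =====
theorem extract_html_content_py_spec : Claim_equal_extract_html_content_py := by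
  intro files _
  unfold Spec_extract_html_content_py extract_html_content_py extract_html_content_py_alt
  simp only [candidates_eq, min?_rank]
  set d := PySem.Dict.ofList files with hd
  set c := d.keys.filter (fun f => PySem.Str.endswith f ".html") with hc
  have hmem : ∀ p : String, PySem.Str.endswith p ".html" = true → (p ∈ c ↔ d.contains p = true) := by
    intro p hp
    rw [PySem.Dict.contains_iff_mem_keys]
    simp only [hc, List.mem_filter, hp, and_true]
  simp only [pvFirstPriority]
  by_cases hi : d.contains "index.html" = true
  · have : "index.html" ∈ c := (hmem _ (by decide)).mpr hi
    simp [hi, this]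
  · have hic : "index.html" ∉ c := fun h => hi ((hmem _ (by decide)).mp h)
    by_cases hm : d.contains "main.html" = true
    · have : "main.html" ∈ c := (hmem _ (by decide)).mpr hm
      simp [hi, hm, hic, this]
    · have hmc : "main.html" ∉ c := fun h => hm ((hmem _ (by decide)).mp h)
      by_cases ha : d.contains "app.html" = true
      · have : "app.html" ∈ c := (hmem _ (by decide)).mpr ha
        simp [hi, hm, ha, hic, hmc, this]
      · have hac : "app.html" ∉ c := fun h => ha ((hmem _ (by decide)).mp h)
        simp only [hi, hm, ha, if_false, hic, hmc, hac]
        cases c <;> simp
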